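-- pv_equiv track=rewrite | github.com/bdenckla/quadratic | my_primefac.py | realize
-- ===== SOURCE A (Python) =====
-- def realize(pf):
--     numerator = 1
--     denominator = 1
--     for prime, power in pf.items():
--         if power >= 0:
--             numerator *= prime ** power
--         else:
--             denominator *= prime ** (-power)
--     return numerator, denominator
-- ===== SOURCE B (Python) =====
-- def realize(pf):
--     def single(prime, power):
--         return (prime ** power, 1) if power >= 0 else (1, prime ** (-power))
--
--     def go(items):
--         if not items:
--             return (1, 1)
--         if len(items) == 1:
--             return single(*items[0])
--         mid = len(items) // 2
--         n1, d1 = go(items[:mid])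
--         n2, d2 = go(items[mid:])
--         return (n1 * n2, d1 * d2)
--
--     return go(list(pf.items()))
-- ===== Notes on version B (the rewrite author's own statement) =====
-- stated objective: faster
-- what changed: Replaces A's single left-to-right branched accumulation with a divide-and-conquer recursion: split the item list in half, recursively realize each half, and combine the two (numerator, denominator) pairs by component-wise multiplication; correct because both components are products over the items and Int multiplication is associative and commutative.
import Mathlib
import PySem

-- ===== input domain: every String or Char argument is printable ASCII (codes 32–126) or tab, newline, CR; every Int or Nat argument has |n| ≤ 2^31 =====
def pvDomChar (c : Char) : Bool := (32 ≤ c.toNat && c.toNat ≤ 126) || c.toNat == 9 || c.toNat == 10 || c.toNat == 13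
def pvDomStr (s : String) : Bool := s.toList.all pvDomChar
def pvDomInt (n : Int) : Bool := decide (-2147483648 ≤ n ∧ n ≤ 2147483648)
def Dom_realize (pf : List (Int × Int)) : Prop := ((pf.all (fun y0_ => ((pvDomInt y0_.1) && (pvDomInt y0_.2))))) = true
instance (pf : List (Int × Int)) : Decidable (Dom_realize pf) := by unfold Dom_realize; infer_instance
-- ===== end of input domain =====

-- B trades A's single branched left fold for a divide-and-conquer recursion combining half-results; return values proved equal.

-- ===== PORT A =====
def realize (pf : List (Int × Int)) : Int × Int :=
  pf.foldl (fun nd pp =>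
    if pp.2 ≥ 0 then (nd.1 * pp.1 ^ pp.2.toNat, nd.2)
    else (nd.1, nd.2 * pp.1 ^ (-pp.2).toNat)) (1, 1)

-- ===== PORT B =====
-- port of Source B's `single`
def pvSingle (prime power : Int) : Int × Int :=
  if power ≥ 0 then (prime ^ power.toNat, 1) else (1, prime ^ (-power).toNat)

-- port of Source B's `go`: split in half, recurse on both halves, multiply component-wise
def pvGo : List (Int × Int) → Int × Int
  | [] => (1, 1)
  | [pp] => pvSingle pp.1 pp.2
  | pp :: qq :: rest =>
      let l := pp :: qq :: rest
      let m := l.length / 2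
      let a := pvGo (l.take m)
      let b := pvGo (l.drop m)
      (a.1 * b.1, a.2 * b.2)
termination_by l => l.length
decreasing_by
  · simp only [List.length_take, List.length_cons]; omega
  · simp only [List.length_drop, List.length_cons]; omega

def realize_alt (pf : List (Int × Int)) : Int × Int := pvGo pf

-- ===== PRECONDITION & SPEC =====
def Spec_realize (pf : List (Int × Int)) (out : Int × Int) : Prop := out = realize_alt pf
instance (pf : List (Int × Int)) (out : Int × Int) : Decidable (Spec_realize pf out) := by unfold Spec_realize; infer_instance

-- ===== CLAIM (what is proved, stated in full; the proofs are below) =====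
def Claim_equal_realize : Prop := ∀ (pf : List (Int × Int)), Dom_realize pf → Spec_realize pf (realize pf)

-- ===== LEMMAS AND PROOFS =====
-- proof helpers: the two components as products over the list
def pvN (l : List (Int × Int)) : Int :=
  (l.map (fun pp => if pp.2 ≥ 0 then pp.1 ^ pp.2.toNat else 1)).prod
def pvD (l : List (Int × Int)) : Int :=
  (l.map (fun pp => if pp.2 ≥ 0 then 1 else pp.1 ^ (-pp.2).toNat)).prod

theorem pvN_append (a b : List (Int × Int)) : pvN (a ++ b) = pvN a * pvN b := by
  simp [pvN]
theorem pvD_append (a b : List (Int × Int)) : pvD (a ++ b) = pvD a * pvD b := by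
  simp [pvD]

theorem pvGo_eq (l : List (Int × Int)) : pvGo l = (pvN l, pvD l) := by
  induction l using pvGo.induct with
  | case1 => simp [pvGo, pvN, pvD]
  | case2 pp =>
      by_cases h : pp.2 ≥ 0 <;> simp [pvGo, pvSingle, pvN, pvD, h]
  | case3 pp qq rest lv mv h1 h2 =>
      rw [pvGo]
      simp only [mv, lv] at h1 h2
      rw [h1, h2]
      have := List.take_append_drop ((pp :: qq :: rest).length / 2) (pp :: qq :: rest)
      conv_rhs => rw [← this]
      rw [pvN_append, pvD_append]

theorem realize_foldl_eq (pf : List (Int × Int)) (n d : Int) :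
    pf.foldl (fun nd pp =>
      if pp.2 ≥ 0 then (nd.1 * pp.1 ^ pp.2.toNat, nd.2)
      else (nd.1, nd.2 * pp.1 ^ (-pp.2).toNat)) (n, d)
    = (n * pvN pf, d * pvD pf) := by
  induction pf generalizing n d with
  | nil => simp [pvN, pvD]
  | cons pp rest ih =>
      by_cases h : pp.2 ≥ 0 <;>
        simp [h, ih, pvN, pvD, mul_assoc]

-- ===== VERDICT (by name: the statement is the Claim_ definition above) =====
theorem realize_spec : Claim_equal_realize := by
  intro pf _
  unfold Spec_realize realize realize_alt
  rw [realize_foldl_eq, pvGo_eq]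
  simp
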